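/- GENERATED by mk_final_copies.py from the proof of the farm's unit `start_decoder.C11` (farm:start_decoder.C11.2: Proof.lean) as the
   re-elaboration sweep compiled it — do not edit. -/
import Vorbis.Spec.Units.start_decoder_C11
import Vorbis.Spec.Worked.start_decoder_C11_Lemmas

open X86 X86.User Asan Vorbis Vorbis.Spec Vorbis.Spec.StartDecoder

set_option maxRecDepth 4000
set_option maxHeartbeats 4000000

namespace Vorbis.Spec.start_decoder_C11

/-- **Loop 3892 (`for (j = 0; j < (int) c->lookup_values; ++j) mults[j] = get_bits(f, c->value_bits)`), from its head
`cut157` = 0x114ca3 to the segment's exit `AtC12`**: induction on a bound `k` of the measure `2^30 − j` (at every head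
`j ≤ LV < 2^30`); one round is `legH1` (the test and `get_bits`) then `legH2` (the store, `++j`). -/
theorem loop_reach {Lay : Layout} {μ : Microarch} {u₀ : State} (henv : Env0 Lay μ u₀)
    (hld4 : Asan.SmallCheck Lay μ Vorbis.WayInv (Vorbis.CodeOK u₀) [.rax, .rcx, .rdx] 4 Vorbis.L.__asan_load4_noabort.entry)
    (hld1 : Asan.SmallCheck Lay μ Vorbis.WayInv (Vorbis.CodeOK u₀) [.rax, .rdx] 1 Vorbis.L.__asan_load1_noabort.entry)
    (hst2 : Asan.SmallCheck Lay μ Vorbis.WayInv (Vorbis.CodeOK u₀) [.rax, .rcx, .rdx] 2 Vorbis.L.__asan_store2_noabort.entry)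
    (h_get_bits : ∀ (others : List Obj) (frames : List (Nat × FrameLayout)) (Blk : Block → Prop) (len : Nat),
      Calls Lay μ Vorbis.WayInv (Vorbis.conv u₀) Vorbis.L.get_bits.entry (Vorbis.Spec.get_bits.spec others frames Blk len))
    (g : Ghost) (i : Nat) (A2 A3 Ai : Arena) (A : Arena × List Obj) (mults : Nat) :
    ∀ (k j : Nat) (v : State), AtHead11 u₀ g i A2 A3 Ai A mults j v → 2 ^ 30 - j ≤ k →
      ReachVia Lay μ WayInv v (fun w => AtC12 u₀ g i w ∨ AtERR u₀ g w) := by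
  intro k
  induction k with
  | zero =>
    intro j v hat hk
    exfalso
    have h1 := hat.j_le
    have h2 := hat.mults.lv_lt
    omega
  | succ k ih =>
    intro j v hat hk
    -- the head: the loop test, then `get_bits`
    apply ReachVia.trans (legH1 henv hld4 hld1 h_get_bits g i A2 A3 Ai A mults j v hat)
    intro w hw
    rcases hw with h12 | hbody
    · exact ReachVia.done (Or.inl h12)
    · -- the body: `mults[j] = q`, `++j`, back to the head
      apply ReachVia.trans (legH2 henv hst2 g i A2 A3 Ai A mults j w hbody)
      intro w2 hw2
      have h1 := hbody.j_lt
      have h2 := hbody.trip.mults.lv_lt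
      exact ih (j + 1) w2 hw2 (by omega)

/-- **From 0x114c6f (`AtLV`: `lookup_values` stored) to the segment's exits**: `legF` (the `== 0` test, `setup_temp_malloc`), `legG`
(the spill, the NULL test), the loop; the two error stubs of lines 3889 and 3891. -/
theorem reach_from_lv {Lay : Layout} {μ : Microarch} {u₀ : State} (henv : Env0 Lay μ u₀)
    (hld4 : Asan.SmallCheck Lay μ Vorbis.WayInv (Vorbis.CodeOK u₀) [.rax, .rcx, .rdx] 4 Vorbis.L.__asan_load4_noabort.entry)
    (hld1 : Asan.SmallCheck Lay μ Vorbis.WayInv (Vorbis.CodeOK u₀) [.rax, .rdx] 1 Vorbis.L.__asan_load1_noabort.entry)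
    (hst2 : Asan.SmallCheck Lay μ Vorbis.WayInv (Vorbis.CodeOK u₀) [.rax, .rcx, .rdx] 2 Vorbis.L.__asan_store2_noabort.entry)
    (h_get_bits : ∀ (others : List Obj) (frames : List (Nat × FrameLayout)) (Blk : Block → Prop) (len : Nat),
      Calls Lay μ Vorbis.WayInv (Vorbis.conv u₀) Vorbis.L.get_bits.entry (Vorbis.Spec.get_bits.spec others frames Blk len))
    (h_stm : ∀ (others : List Obj) (frames : List (Nat × FrameLayout)) (A : Arena),
      Calls Lay μ Vorbis.WayInv (Vorbis.conv u₀) Vorbis.L.setup_temp_malloc.entry (Vorbis.Spec.setup_temp_malloc.spec others frames A))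
    (h_error : ∀ (others : List Obj) (frames : List (Nat × FrameLayout)),
      Calls Lay μ Vorbis.WayInv (Vorbis.conv u₀) Vorbis.L.error.entry (Vorbis.Spec.error.spec others frames))
    (g : Ghost) (i : Nat) (A2 A3 Ai : Arena) (A : Arena × List Obj) (v : State) (hat : AtLV u₀ g i A2 A3 Ai A v) :
    ReachVia Lay μ WayInv v (fun w => AtC12 u₀ g i w ∨ AtERR u₀ g w) := by
  -- 0x114c6f: `if (c->lookup_values == 0)`, `setup_temp_malloc`
  apply ReachVia.trans (legF henv hld4 h_stm g i A2 A3 Ai A v hat)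
  intro v1 h1
  rcases h1 with ⟨A', hal⟩ | ⟨hmid, hrip⟩
  · -- 0x114c91: the spill of `mults`, `if (mults == NULL)`
    apply ReachVia.trans (legG henv g i A2 A3 Ai A' v1 hal)
    intro v2 h2
    rcases h2 with ⟨mults, hhead⟩ | ⟨hmid, hrip⟩
    · -- 0x114ca3: the loop
      exact loop_reach henv hld4 hld1 hst2 h_get_bits g i A2 A3 Ai A' mults (2 ^ 30) 0 v2 hhead (by omega)
    · -- 0x114d6f: `return error(f, VORBIS_outofmem)`
      apply ReachVia.trans (stub_3891 henv h_error g i A2 A3 Ai A' v2 hmid hrip)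
      intro w hw
      exact ReachVia.done (Or.inr hw)
  · -- 0x114d58: `return error(f, VORBIS_invalid_setup)` of line 3889
    apply ReachVia.trans (stub_3889 henv h_error g i A2 A3 Ai A v1 hmid hrip)
    intro w hw
    exact ReachVia.done (Or.inr hw)

end Vorbis.Spec.start_decoder_C11

/-- **Segment C11 of `start_decoder`** (0x114bad – 0x114db4, C lines 3878 – 3895): `minimum_value`, `delta_value`, `value_bits`,
`sequence_p` (`reach_c35`), the dispatch on `lookup_type` (`legE0`), `lookup_values` of a type-2 book (`legE2`) or of a type-1 book
with FIX 17 (`legE1a`, `legE1b`), then `reach_from_lv`. -/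
theorem Vorbis.Spec.Worked.start_decoder_C11_ok : Vorbis.Spec.start_decoder_C11.Statement := by
  unfold Vorbis.Spec.start_decoder_C11.Statement
  intro Lay hLay μ hμ u₀ hcode h_get_bits h_f32 hst4 hst1 hld1 hld4 h_stm hst2 h_l1v h_error _h_stf
  intro g i v hat
  obtain ⟨A, A2, A3, Ai, h⟩ := hat
  have henv : Vorbis.Spec.start_decoder_C11.Env0 Lay μ u₀ := ⟨hLay, hμ, hcode⟩
  -- 0x114bad → 0x114c35: C lines 3878 – 3881
  apply ReachVia.trans (Vorbis.Spec.start_decoder_C11.reach_c35 henv h_get_bits h_f32 hst4 hst1 g i A2 A3 Ai A v h)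
  intro v1 h1
  -- 0x114c35: `if (c->lookup_type == 1)`
  apply ReachVia.trans (Vorbis.Spec.start_decoder_C11.legE0 henv hld1 g i A2 A3 Ai A v1 h1.1 h1.2)
  intro v2 h2
  rcases h2 with ⟨hp, hlt, hvb⟩ | ⟨hp, hlt, hvb⟩
  · -- a type-2 book, 0x114c49: `lookup_values = entries * dimensions`
    apply ReachVia.trans (Vorbis.Spec.start_decoder_C11.legE2 henv hst4 hld4 g i A2 A3 Ai A v2 hp hlt hvb)
    intro v3 h3
    obtain ⟨hp3, hlv3, hvb3, hlt3⟩ := h3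
    refine Vorbis.Spec.start_decoder_C11.reach_from_lv henv hld4 hld1 hst2 h_get_bits h_stm h_error g i A2 A3 Ai A v3
      ⟨hp3, hvb3, ?_, ?_⟩
    · intro h1
      rw [hlt3] at h1
      exact absurd h1 (by decide)
    · intro _
      exact hlv3
  · -- a type-1 book, 0x114cfb: `lookup1_values`, FIX 17
    apply ReachVia.trans (Vorbis.Spec.start_decoder_C11.legE1a henv hld4 h_l1v g i A2 A3 Ai A v2 hp hlt hvb)
    intro v3 h3
    obtain ⟨hp3, hlt3, hvb3⟩ := h3
    apply ReachVia.trans (Vorbis.Spec.start_decoder_C11.legE1b henv hst4 hld4 g i A2 A3 Ai A v3 hp3 hlt3 hvb3)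
    intro v4 h4
    rcases h4 with hlv | ⟨hmid, hrip⟩
    · exact Vorbis.Spec.start_decoder_C11.reach_from_lv henv hld4 hld1 hst2 h_get_bits h_stm h_error g i A2 A3 Ai A v4 hlv
    · -- 0x114d41: `return error(f, VORBIS_invalid_setup)` of line 3884
      apply ReachVia.trans (Vorbis.Spec.start_decoder_C11.stub_3884 henv h_error g i A2 A3 Ai A v4 hmid hrip)
      intro w hw
      exact ReachVia.done (Or.inr hw)
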